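-- pv_equiv track=rewrite | github.com/repji01/py-checkio-solutions | py_checkio_solutions/Twilio SendGrid/stressful_subject.py | is_stressful
-- ===== SOURCE A (Python) =====
-- red_words = {"HELP","ASAP","URGENT"}
--
-- def is_stressful(subj):
--     """
--         recoognise stressful subject
--     """
--     if (subj.isupper()) or (subj.endswith("!!!")):
--         return True
--
--     excl = lambda attr,char: ''.join([x+ char for x in attr])[:-1]
--     removed = lambda attr:''.join(['' if i>0 and e==attr[i-1] else e for i,e in enumerate(attr)])
--
--     subj = (removed(subj.upper()))
--
--     for word in red_words:
--         if (subj.find(word) != -1) or (subj.find(excl(word,"!")) != -1) or (subj.find(excl(word,"-")) != -1)or (subj.find(excl(word,".")) != -1):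
--             return True
--
--     return False
-- ===== SOURCE B (Python) =====
-- RED_WORDS = ("HELP", "ASAP", "URGENT")
-- SEPS = "!-."
--
--
-- def _match_plain(s, i, w):
--     # w matches contiguously at position i of s
--     for c in w:
--         if i >= len(s) or s[i] != c:
--             return False
--         i += 1
--     return True
--
--
-- def _match_var(s, p, i, w):
--     # w matches at position i with separator p between every two letters
--     if not w:
--         return True
--     if i >= len(s) or s[i] != w[0]:
--         return False
--     i += 1
--     for c in w[1:]:
--         if i + 1 >= len(s) or s[i] != p or s[i + 1] != c:
--             return False
--         i += 2
--     return True
--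
--
-- def is_stressful(subj):
--     if subj.isupper() or subj.endswith("!!!"):
--         return True
--     out = []
--     for ch in subj.upper():
--         if not out or out[-1] != ch:
--             out.append(ch)
--     s = out
--     for i in range(len(s)):
--         for w in RED_WORDS:
--             if _match_plain(s, i, w) or any(_match_var(s, p, i, w) for p in SEPS):
--                 return True
--     return False
-- ===== Notes on version B (the rewrite author's own statement) =====
-- stated objective: alternative
-- what changed: Instead of constructing four separator-interleaved pattern strings per red word and calling str.find on each, B scans the collapsed string position by position with a direct character-level matcher that checks each red word plainly or with one consistent separator character.
import Mathlib
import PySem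

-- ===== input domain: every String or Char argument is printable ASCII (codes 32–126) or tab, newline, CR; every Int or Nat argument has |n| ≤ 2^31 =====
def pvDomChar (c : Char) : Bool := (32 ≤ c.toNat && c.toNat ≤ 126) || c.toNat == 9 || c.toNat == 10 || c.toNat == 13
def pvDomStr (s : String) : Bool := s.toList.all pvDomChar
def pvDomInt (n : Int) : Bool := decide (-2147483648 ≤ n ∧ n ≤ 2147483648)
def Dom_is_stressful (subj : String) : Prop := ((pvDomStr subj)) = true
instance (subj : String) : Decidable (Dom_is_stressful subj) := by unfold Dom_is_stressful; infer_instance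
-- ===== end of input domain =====

-- B replaces A's "build four separator-interleaved variants per red word and str.find each"
-- by a single positional scan with a direct character-level matcher (alternative algorithm, similar cost).

-- ===== PORT A =====
-- str.isupper(): at least one cased character and no lowercase one; exact on the ASCII domain,
-- where the cased characters are exactly the letters.
def pyIsUpper (cs : List Char) : Bool :=
  cs.any (fun c => PySem.Chars.isalpha c) && cs.all (fun c => !PySem.Chars.islower c)

-- red_words is a Python set iterated only under any(); the result does not depend on iteration order
def red_words : List String := ["HELP", "ASAP", "URGENT"]

-- excl = lambda attr,char: ''.join([x+char for x in attr])[:-1]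
def exclA (attr : List Char) (char : Char) : List Char :=
  PySem.List.slice (attr.flatMap (fun x => [x, char])) none (some (-1))

-- removed = lambda attr: ''.join(['' if i>0 and e==attr[i-1] else e for i,e in enumerate(attr)])
def removedA (attr : List Char) : List Char :=
  ((PySem.List.enumerate attr).map
    (fun ie => if 0 < ie.1 ∧ PySem.List.pyGet? attr (ie.1 - 1) = some ie.2 then ([] : List Char) else [ie.2])).flatten

def is_stressful (subj : String) : Bool :=
  if pyIsUpper subj.toList || PySem.Str.endswith subj "!!!" then true
  else
    let s := removedA (PySem.Chars.upper subj.toList)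
    red_words.any (fun word =>
      decide (PySem.Chars.find s word.toList ≠ -1) ||
      decide (PySem.Chars.find s (exclA word.toList '!') ≠ -1) ||
      decide (PySem.Chars.find s (exclA word.toList '-') ≠ -1) ||
      decide (PySem.Chars.find s (exclA word.toList '.') ≠ -1))

-- ===== PORT B =====
def matchPlain (s : List Char) : Nat → List Char → Bool
  | _, [] => true
  | i, c :: rest => s[i]? == some c && matchPlain s (i + 1) rest

def matchTail (s : List Char) (p : Char) : Nat → List Char → Bool
  | _, [] => true
  | i, c :: rest => s[i]? == some p && s[i + 1]? == some c && matchTail s p (i + 2) rest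

def matchVar (s : List Char) (p : Char) (i : Nat) : List Char → Bool
  | [] => true
  | c :: rest => s[i]? == some c && matchTail s p (i + 1) rest

def collapseB (cs : List Char) : List Char :=
  cs.foldl (fun out ch => if out.getLast? = some ch then out else out ++ [ch]) []

def is_stressful_alt (subj : String) : Bool :=
  if pyIsUpper subj.toList || PySem.Str.endswith subj "!!!" then true
  else
    let s := collapseB (PySem.Chars.upper subj.toList)
    (List.range s.length).any (fun i =>
      red_words.any (fun w =>
        matchPlain s i w.toList || ['!', '-', '.'].any (fun p => matchVar s p i w.toList)))

-- ===== PRECONDITION & SPEC =====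
def Spec_is_stressful (subj : String) (out : Bool) : Prop := out = is_stressful_alt subj
instance (subj : String) (out : Bool) : Decidable (Spec_is_stressful subj out) := by unfold Spec_is_stressful; infer_instance

-- ===== CLAIM (what is proved, stated in full; the proofs are below) =====
def Claim_equal_is_stressful : Prop := ∀ (subj : String), Dom_is_stressful subj → Spec_is_stressful subj (is_stressful subj)

-- ===== LEMMAS AND PROOFS =====

-- chain-collapse of consecutive duplicates, with `prev` the last kept character
def rem2 (prev : Char) : List Char → List Char
  | [] => []
  | b :: t => (if b = prev then ([] : List Char) else [b]) ++ rem2 b t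

lemma collapseB_go (t : List Char) : ∀ (acc : List Char) (prev : Char), acc.getLast? = some prev →
    t.foldl (fun out ch => if out.getLast? = some ch then out else out ++ [ch]) acc = acc ++ rem2 prev t := by
  induction t with
  | nil => simp [rem2]
  | cons b t ih =>
    intro acc prev hlast
    simp only [List.foldl_cons, rem2]
    by_cases hb : b = prev
    · subst hb
      rw [if_pos hlast, ih acc b hlast]
      simp
    · rw [if_neg (by rw [hlast]; simpa using Ne.symm hb), ih (acc ++ [b]) b (by simp)]
      simp [hb]

lemma collapseB_eq (cs : List Char) :
    collapseB cs = match cs with | [] => [] | a :: t => a :: rem2 a t := by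
  cases cs with
  | nil => rfl
  | cons a t =>
    show List.foldl _ _ (a :: t) = _
    simp only [List.foldl_cons]
    rw [show (if ([] : List Char).getLast? = some a then ([] : List Char) else [] ++ [a]) = [a] by simp]
    rw [collapseB_go t [a] a (by simp)]
    simp

lemma enumerate_cons (b : Char) (t : List Char) (k : Int) :
    PySem.List.enumerate (b :: t) k = (k, b) :: PySem.List.enumerate t (k + 1) := rfl

lemma removedA_go (t : List Char) : ∀ (u : List Char) (a : Char) (k : Int), k = (u.length : Int) + 1 →
    ((PySem.List.enumerate t k).map
      (fun ie => if 0 < ie.1 ∧ PySem.List.pyGet? (u ++ a :: t) (ie.1 - 1) = some ie.2 then ([] : List Char) else [ie.2])).flatten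
      = rem2 a t := by
  induction t with
  | nil => intro u a k hk; simp [PySem.List.enumerate, rem2]
  | cons b t ih =>
    intro u a k hk
    rw [enumerate_cons]
    simp only [List.map_cons, List.flatten_cons, rem2]
    congr 1
    · have hget : PySem.List.pyGet? (u ++ a :: b :: t) (k - 1) = some a := by
        rw [show k - 1 = ((u.length : Nat) : Int) by omega]
        rw [PySem.List.pyGet?_natCast]
        simp
      rw [hget]
      by_cases hb : b = a
      · subst hb; rw [if_pos ⟨by omega, rfl⟩]; simp
      · rw [if_neg (by rintro ⟨-, h⟩; exact hb (by simpa using h.symm))]; simp [hb]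
    · have := ih (u ++ [a]) b (k + 1) (by simp; omega)
      rw [show (u ++ [a]) ++ b :: t = u ++ a :: b :: t by simp] at this
      exact this

lemma removedA_eq (cs : List Char) :
    removedA cs = match cs with | [] => [] | a :: t => a :: rem2 a t := by
  cases cs with
  | nil => rfl
  | cons a t =>
    unfold removedA
    rw [enumerate_cons]
    simp only [List.map_cons, List.flatten_cons]
    rw [if_neg (by simp)]
    have h := removedA_go t [] a (0 + 1) (by simp)
    simp only [List.nil_append] at h
    exact (congrArg (fun z => [a] ++ z) h).trans rfl

lemma removedA_eq_collapseB (cs : List Char) : removedA cs = collapseB cs := by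
  rw [removedA_eq, collapseB_eq]

lemma cons_prefix_drop (s : List Char) (i : Nat) (c : Char) (w : List Char) :
    (c :: w <+: s.drop i) ↔ s[i]? = some c ∧ w <+: s.drop (i + 1) := by
  by_cases h : i < s.length
  · rw [List.drop_eq_getElem_cons h, List.cons_prefix_cons, List.getElem?_eq_getElem h]
    simp [eq_comm]
  · rw [List.drop_eq_nil_of_le (by omega)]
    simp only [List.getElem?_eq_none_iff.mpr (by omega : s.length ≤ i)]
    constructor
    · intro hp; exact absurd hp.length_le (by simp)
    · rintro ⟨h1, -⟩; exact absurd h1 (by simp)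

lemma matchPlain_iff (s : List Char) (w : List Char) (i : Nat) :
    matchPlain s i w = true ↔ w <+: s.drop i := by
  induction w generalizing i with
  | nil => simp [matchPlain]
  | cons c rest ih => rw [matchPlain, cons_prefix_drop]; simp [ih]

lemma matchTail_iff (s : List Char) (p : Char) (w : List Char) (i : Nat) :
    matchTail s p i w = true ↔ (w.flatMap (fun c => [p, c])) <+: s.drop i := by
  induction w generalizing i with
  | nil => simp [matchTail]
  | cons c rest ih =>
    rw [matchTail]
    simp only [List.flatMap_cons, List.cons_append, List.nil_append, cons_prefix_drop]
    rw [show i + 1 + 1 = i + 2 from rfl, ← ih]; simp; tauto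

lemma dropLast_flatMap (p : Char) (c : Char) (rest : List Char) :
    ((c :: rest).flatMap (fun x => [x, p])).dropLast = c :: rest.flatMap (fun x => [p, x]) := by
  induction rest generalizing c with
  | nil => rfl
  | cons d t ih =>
    simp only [List.flatMap_cons, List.cons_append]
    have h := ih d
    simp only [List.flatMap_cons, List.cons_append, List.nil_append] at h ⊢
    rw [List.dropLast_cons_of_ne_nil (by simp), List.dropLast_cons_of_ne_nil (by simp), h]

lemma exclA_eq (c : Char) (rest : List Char) (p : Char) :
    exclA (c :: rest) p = c :: rest.flatMap (fun x => [p, x]) := by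
  unfold exclA
  rw [show PySem.List.slice ((c :: rest).flatMap (fun x => [x, p])) none (some (-1)) = ((c :: rest).flatMap (fun x => [x, p])).dropLast from ?_]
  · exact dropLast_flatMap p c rest
  · simp only [PySem.List.slice]
    rw [List.dropLast_eq_take]
    congr 1
    simp [List.length_flatMap]

lemma matchVar_iff (s : List Char) (p : Char) (c : Char) (rest : List Char) (i : Nat) :
    matchVar s p i (c :: rest) = true ↔ exclA (c :: rest) p <+: s.drop i := by
  rw [exclA_eq, matchVar, cons_prefix_drop]
  simp [matchTail_iff]

lemma infix_iff_exists_lt (s v : List Char) (hv : v ≠ []) :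
    v <:+: s ↔ ∃ i < s.length, v <+: s.drop i := by
  constructor
  · rintro ⟨t, u, rfl⟩
    refine ⟨t.length, ?_, ?_⟩
    · cases v with | nil => exact absurd rfl hv | cons a b => simp
    · simp [List.drop_left' (by rfl)]
  · rintro ⟨i, -, h⟩
    exact h.isInfix.trans ((s.drop_suffix i).isInfix)

lemma exists_lt_or4 (n : Nat) (P Q R S : Nat → Prop) :
    (∃ i, i < n ∧ (P i ∨ Q i ∨ R i ∨ S i)) ↔
      ((∃ i, i < n ∧ P i) ∨ (∃ i, i < n ∧ Q i) ∨ (∃ i, i < n ∧ R i) ∨ (∃ i, i < n ∧ S i)) := by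
  constructor
  · rintro ⟨i, hi, h|h|h|h⟩
    · exact Or.inl ⟨i, hi, h⟩
    · exact Or.inr (Or.inl ⟨i, hi, h⟩)
    · exact Or.inr (Or.inr (Or.inl ⟨i, hi, h⟩))
    · exact Or.inr (Or.inr (Or.inr ⟨i, hi, h⟩))
  · rintro (⟨i,hi,h⟩|⟨i,hi,h⟩|⟨i,hi,h⟩|⟨i,hi,h⟩)
    exacts [⟨i, hi, Or.inl h⟩, ⟨i, hi, Or.inr (Or.inl h)⟩, ⟨i, hi, Or.inr (Or.inr (Or.inl h))⟩, ⟨i, hi, Or.inr (Or.inr (Or.inr h))⟩]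

lemma word_iff (s : List Char) (c : Char) (rest : List Char) :
    ((decide (PySem.Chars.find s (c :: rest) ≠ -1) ||
      decide (PySem.Chars.find s (exclA (c :: rest) '!') ≠ -1) ||
      decide (PySem.Chars.find s (exclA (c :: rest) '-') ≠ -1) ||
      decide (PySem.Chars.find s (exclA (c :: rest) '.') ≠ -1)) = true)
    ↔ ∃ i, i < s.length ∧
        ((matchPlain s i (c :: rest) || ['!', '-', '.'].any (fun p => matchVar s p i (c :: rest))) = true) := by
  simp only [Bool.or_eq_true, decide_eq_true_eq, PySem.Chars.find_ne_neg_one_iff,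
    List.any_cons, List.any_nil, matchPlain_iff, matchVar_iff, Bool.false_eq_true, or_false]
  rw [infix_iff_exists_lt s (c :: rest) (by simp),
      infix_iff_exists_lt s (exclA (c :: rest) '!') (by rw [exclA_eq]; simp),
      infix_iff_exists_lt s (exclA (c :: rest) '-') (by rw [exclA_eq]; simp),
      infix_iff_exists_lt s (exclA (c :: rest) '.') (by rw [exclA_eq]; simp)]
  rw [exists_lt_or4 s.length
      (fun i => c :: rest <+: s.drop i)
      (fun i => exclA (c :: rest) '!' <+: s.drop i)
      (fun i => exclA (c :: rest) '-' <+: s.drop i)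
      (fun i => exclA (c :: rest) '.' <+: s.drop i)]
  rw [or_assoc, or_assoc]

lemma body_eq (s : List Char) :
    (red_words.any (fun word =>
      decide (PySem.Chars.find s word.toList ≠ -1) ||
      decide (PySem.Chars.find s (exclA word.toList '!') ≠ -1) ||
      decide (PySem.Chars.find s (exclA word.toList '-') ≠ -1) ||
      decide (PySem.Chars.find s (exclA word.toList '.') ≠ -1)))
    = (List.range s.length).any (fun i =>
        red_words.any (fun w =>
          matchPlain s i w.toList || ['!', '-', '.'].any (fun p => matchVar s p i w.toList))) := by
  rw [Bool.eq_iff_iff]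
  simp only [List.any_eq_true, List.mem_range, red_words, List.mem_cons, List.not_mem_nil, or_false]
  constructor
  · rintro ⟨w, (rfl|rfl|rfl), hw⟩
    · obtain ⟨i, hi, h⟩ := (word_iff s 'H' ['E','L','P']).mp hw
      exact ⟨i, hi, "HELP", Or.inl rfl, h⟩
    · obtain ⟨i, hi, h⟩ := (word_iff s 'A' ['S','A','P']).mp hw
      exact ⟨i, hi, "ASAP", Or.inr (Or.inl rfl), h⟩
    · obtain ⟨i, hi, h⟩ := (word_iff s 'U' ['R','G','E','N','T']).mp hw
      exact ⟨i, hi, "URGENT", Or.inr (Or.inr rfl), h⟩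
  · rintro ⟨i, hi, w, (rfl|rfl|rfl), hw⟩
    · exact ⟨"HELP", Or.inl rfl, (word_iff s 'H' ['E','L','P']).mpr ⟨i, hi, hw⟩⟩
    · exact ⟨"ASAP", Or.inr (Or.inl rfl), (word_iff s 'A' ['S','A','P']).mpr ⟨i, hi, hw⟩⟩
    · exact ⟨"URGENT", Or.inr (Or.inr rfl), (word_iff s 'U' ['R','G','E','N','T']).mpr ⟨i, hi, hw⟩⟩

-- ===== VERDICT (by name: the statement is the Claim_ definition above) =====
theorem is_stressful_spec : Claim_equal_is_stressful := by
  intro subj _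
  unfold Spec_is_stressful is_stressful is_stressful_alt
  by_cases hg : (pyIsUpper subj.toList || PySem.Str.endswith subj "!!!") = true
  · rw [if_pos hg, if_pos hg]
  · rw [if_neg hg, if_neg hg]
    rw [removedA_eq_collapseB]
    exact body_eq (collapseB (PySem.Chars.upper subj.toList))
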